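-- pv_equiv track=rewrite | github.com/Bigsmooth68/Extract-PDF-to-CSV | analyse.py | extraire_section
-- ===== SOURCE A (Python) =====
-- def extraire_section(text, start_pattern: str, end_pattern: str):
--     """
--     Selection des lignes entre start_pattern et end_pattern
--     """
--     section = []
--     inside_section = False
--     for line in text.splitlines():
--         if start_pattern in line:
--             inside_section = True
--         if inside_section and end_pattern in line:
--             section.append(line)
--             return section
--         if inside_section:
--             section.append(line)
--     return section
-- ===== SOURCE B (Python) =====
-- def extraire_section(text, start_pattern: str, end_pattern: str):
--     lines = text.splitlines()
--     start = next((i for i, l in enumerate(lines) if start_pattern in l), None)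
--     if start is None:
--         return []
--     for end in range(start, len(lines)):
--         if end_pattern in lines[end]:
--             return lines[start:end + 1]
--     return lines[start:]
-- ===== Notes on version B (the rewrite author's own statement) =====
-- stated objective: alternative
-- what changed: Replaces the interleaved inside_section state machine with a locate-boundaries-then-slice decomposition: find the first line containing start_pattern, then the first end_pattern line from there, and slice.
import Mathlib
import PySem

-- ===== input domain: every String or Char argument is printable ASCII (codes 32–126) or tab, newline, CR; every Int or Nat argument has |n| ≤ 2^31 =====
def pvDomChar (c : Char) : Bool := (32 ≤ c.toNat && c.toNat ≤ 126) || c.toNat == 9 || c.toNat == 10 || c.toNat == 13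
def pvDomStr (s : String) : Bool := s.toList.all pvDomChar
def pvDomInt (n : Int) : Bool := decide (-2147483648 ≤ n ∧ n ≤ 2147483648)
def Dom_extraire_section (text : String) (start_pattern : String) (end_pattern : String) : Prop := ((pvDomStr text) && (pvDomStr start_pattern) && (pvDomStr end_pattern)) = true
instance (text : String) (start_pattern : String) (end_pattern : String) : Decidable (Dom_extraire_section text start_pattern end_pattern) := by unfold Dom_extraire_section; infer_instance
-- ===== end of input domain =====

-- ===== PORT A =====
-- B restates A's state-machine extraction as locate-boundaries-then-slice (alternative decomposition; return value only).

-- A's for-loop over the lines, carrying the section accumulator and the inside_section flag.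
def extraireLoopA (sp ep : String) : List String → List String → Bool → List String
  | [], acc, _ => acc
  | l :: ls, acc, inside =>
    let inside' := inside || PySem.Str.isIn sp l
    if inside' && PySem.Str.isIn ep l then acc ++ [l]
    else if inside' then extraireLoopA sp ep ls (acc ++ [l]) inside'
    else extraireLoopA sp ep ls acc inside'

def extraire_section (text : String) (start_pattern : String) (end_pattern : String) : List String :=
  extraireLoopA start_pattern end_pattern (PySem.Str.splitlines text) [] false

-- ===== PORT B =====
def extraire_section_alt (text : String) (start_pattern : String) (end_pattern : String) : List String :=
  let lines := PySem.Str.splitlines text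
  match lines.findIdx? (fun l => PySem.Str.isIn start_pattern l) with
  | none => []
  | some start =>
    -- scan from `start` for the first end_pattern line; lines[start:end+1] = (drop start).take (j+1)
    match (lines.drop start).findIdx? (fun l => PySem.Str.isIn end_pattern l) with
    | some j => (lines.drop start).take (j + 1)
    | none => lines.drop start

-- ===== PRECONDITION & SPEC =====
def Spec_extraire_section (text : String) (start_pattern : String) (end_pattern : String) (out : List String) : Prop := out = extraire_section_alt text start_pattern end_pattern
instance (text : String) (start_pattern : String) (end_pattern : String) (out : List String) : Decidable (Spec_extraire_section text start_pattern end_pattern out) := by unfold Spec_extraire_section; infer_instance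

-- ===== CLAIM (what is proved, stated in full; the proofs are below) =====
def Claim_equal_extraire_section : Prop := ∀ (text : String) (start_pattern : String) (end_pattern : String), Dom_extraire_section text start_pattern end_pattern → Spec_extraire_section text start_pattern end_pattern (extraire_section text start_pattern end_pattern)

-- ===== LEMMAS AND PROOFS =====

-- Once inside the section, the loop appends lines up to and including the first end_pattern line.
theorem extraireLoopA_true (sp ep : String) (ls acc : List String) :
    extraireLoopA sp ep ls acc true =
      acc ++ (match ls.findIdx? (fun l => PySem.Str.isIn ep l) with
              | some j => ls.take (j + 1)
              | none => ls) := by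
  induction ls generalizing acc with
  | nil => simp [extraireLoopA]
  | cons l ls ih =>
    by_cases h : PySem.Chars.isIn ep.toList l.toList = true
    · simp [extraireLoopA, List.findIdx?_cons, h]
    · simp only [extraireLoopA, Bool.true_or, Bool.true_and, PySem.Str.isIn_eq, h, if_true,
        List.findIdx?_cons, ih]
      cases hf : ls.findIdx? (fun l => PySem.Chars.isIn ep.toList l.toList) <;> simp

-- Before the section starts, the loop skips lines until the first start_pattern line.
theorem extraireLoopA_false (sp ep : String) (ls : List String) :
    extraireLoopA sp ep ls [] false =
      match ls.findIdx? (fun l => PySem.Str.isIn sp l) with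
      | none => []
      | some i =>
        match (ls.drop i).findIdx? (fun l => PySem.Str.isIn ep l) with
        | some j => (ls.drop i).take (j + 1)
        | none => ls.drop i := by
  induction ls with
  | nil => simp [extraireLoopA]
  | cons l ls ih =>
    by_cases hs : PySem.Chars.isIn sp.toList l.toList = true
    · have hrw : extraireLoopA sp ep (l :: ls) [] false = extraireLoopA sp ep (l :: ls) [] true := by
        simp [extraireLoopA, hs]
      rw [hrw, extraireLoopA_true]
      simp only [List.findIdx?_cons, PySem.Str.isIn_eq, hs, if_true, List.drop_zero,
        List.nil_append]
    · simp only [extraireLoopA, Bool.false_or, PySem.Str.isIn_eq, hs, Bool.false_and,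
        ih, List.findIdx?_cons]
      cases hf : ls.findIdx? (fun l => PySem.Chars.isIn sp.toList l.toList) <;> simp

-- ===== VERDICT (by name: the statement is the Claim_ definition above) =====
theorem extraire_section_spec : Claim_equal_extraire_section := by
  intro text sp ep _
  unfold Spec_extraire_section extraire_section extraire_section_alt
  rw [extraireLoopA_false]
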